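-- pv_equiv track=rewrite | github.com/uroborus2s/sinan-captcha | scripts/organize_group2_gap_shapes.py | _boundary_pixel_count
-- ===== SOURCE A (Python) =====
-- def _boundary_pixel_count(mask: tuple[tuple[bool, ...], ...]) -> int:
--     height = len(mask)
--     width = len(mask[0])
--     boundary = 0
--     for row_index in range(height):
--         for column_index in range(width):
--             if not mask[row_index][column_index]:
--                 continue
--             for dx, dy in ((1, 0), (-1, 0), (0, 1), (0, -1)):
--                 nx = column_index + dx
--                 ny = row_index + dy
--                 if nx < 0 or ny < 0 or nx >= width or ny >= height or not mask[ny][nx]: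
--                     boundary += 1
--                     break
--     return boundary
-- ===== SOURCE B (Python) =====
-- def _boundary_pixel_count(mask):
--     width = len(mask[0])
--     grid = [row[:width] for row in mask]
--     pad = (False,) * width
--     total = sum(map(sum, grid))
--     interior = 0
--     for i, cur in enumerate(grid):
--         above = grid[i - 1] if i > 0 else pad
--         below = grid[i + 1] if i + 1 < len(grid) else pad
--         left = (False,) + tuple(cur[:-1])
--         right = tuple(cur[1:]) + (False,)
--         interior += sum(
--             a and u and d and l and r
--             for a, u, d, l, r in zip(cur, above, below, left, right)
--         )
--     return total - interior
-- ===== Notes on version B (the rewrite author's own statement) =====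
-- stated objective: alternative
-- what changed: A scans every cell and, per true cell, probes its four neighbours with a delta loop, bounds checks and an early break; B uses the morphological identity boundary = total true pixels - interior pixels, computing the interior row by row as the pointwise AND of the row with its padded vertical neighbours and its own left/right shifts (erosion by the 4-neighbourhood), with no per-pixel neighbour probing.
import Mathlib
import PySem

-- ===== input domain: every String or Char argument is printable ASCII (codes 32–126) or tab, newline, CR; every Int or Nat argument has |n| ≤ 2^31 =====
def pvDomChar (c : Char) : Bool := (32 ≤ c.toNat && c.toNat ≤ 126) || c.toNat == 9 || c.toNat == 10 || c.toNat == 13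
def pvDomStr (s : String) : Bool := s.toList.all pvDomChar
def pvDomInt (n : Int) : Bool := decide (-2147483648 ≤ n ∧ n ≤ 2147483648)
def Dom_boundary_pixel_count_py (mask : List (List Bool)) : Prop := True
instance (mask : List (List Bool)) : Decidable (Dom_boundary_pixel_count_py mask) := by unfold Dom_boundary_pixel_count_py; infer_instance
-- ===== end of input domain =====

-- B replaces A's per-pixel 4-neighbour probe (with early break) by a morphological identity:
-- boundary = total true pixels − interior pixels, the interior mask obtained by intersecting the
-- grid with its four shifted copies row by row (objective: alternative, same asymptotic cost).

-- ===== PORT A =====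
-- inner 'for dx, dy in …: if …: boundary += 1; break' — returns the increment (1 on break, else 0)
def bpcBreak (mask : List (List Bool)) (width height ci ri : Int) : List (Int × Int) → Int
  | [] => 0
  | (dx, dy) :: rest =>
    let nx := ci + dx
    let ny := ri + dy
    if nx < 0 ∨ ny < 0 ∨ width ≤ nx ∨ height ≤ ny ∨
        PySem.List.pyGetD (PySem.List.pyGetD mask ny []) nx false = false
    then 1 else bpcBreak mask width height ci ri rest

def boundary_pixel_count_py (mask : List (List Bool)) : Int :=
  let height : Int := mask.length
  let width : Int := (PySem.List.pyGetD mask 0 []).length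
  (PySem.List.pyRange 0 height 1).foldl (fun boundary ri =>
    (PySem.List.pyRange 0 width 1).foldl (fun boundary ci =>
      if PySem.List.pyGetD (PySem.List.pyGetD mask ri []) ci false = false then boundary
      else boundary + bpcBreak mask width height ci ri [(1, 0), (-1, 0), (0, 1), (0, -1)])
      boundary) 0

-- ===== PORT B =====
-- sum(a and u and d and l and r for … in zip(cur, above, below, left, right)) — zip stops at the shortest list
def bpcInteriorRow : List Bool → List Bool → List Bool → List Bool → List Bool → Int
  | a :: as, u :: us, d :: ds, l :: ls, r :: rs =>
      (if a && u && d && l && r then 1 else 0) + bpcInteriorRow as us ds ls rs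
  | _, _, _, _, _ => 0

def boundary_pixel_count_py_alt (mask : List (List Bool)) : Int :=
  let width : Int := (PySem.List.pyGetD mask 0 []).length
  let grid : List (List Bool) := mask.map (fun row => row.take width.toNat)  -- row[:width]; width ≥ 0, so take is exact
  let pad : List Bool := List.replicate width.toNat false
  let total : Int := (grid.map (fun row => (row.map (fun b => if b then (1 : Int) else 0)).sum)).sum
  let interior : Int := ((PySem.List.enumerate grid).map (fun ic =>
      let cur := ic.2
      let above := if 0 < ic.1 then PySem.List.pyGetD grid (ic.1 - 1) [] else pad
      let below := if ic.1 + 1 < (grid.length : Int) then PySem.List.pyGetD grid (ic.1 + 1) [] else pad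
      -- left = (False,) + cur[:-1], right = cur[1:] + (False,)
      bpcInteriorRow cur above below (false :: cur.dropLast) (cur.drop 1 ++ [false]))).sum
  total - interior

-- ===== PRECONDITION & SPEC =====
-- Pre_ excludes exactly the inputs where the Python A raises IndexError: the empty mask
-- (mask[0]) and masks with a row shorter than row 0 (mask[row][col] for col < width).
def Pre_boundary_pixel_count_py (mask : List (List Bool)) : Prop :=
  mask ≠ [] ∧ ∀ row ∈ mask, (mask.headI).length ≤ row.length
instance (mask : List (List Bool)) : Decidable (Pre_boundary_pixel_count_py mask) := by
  unfold Pre_boundary_pixel_count_py; infer_instance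
def pvWitness_boundary_pixel_count_py : List (List Bool) := [[true, false], [true, true]]

def Spec_boundary_pixel_count_py (mask : List (List Bool)) (out : Int) : Prop :=
  out = boundary_pixel_count_py_alt mask
instance (mask : List (List Bool)) (out : Int) : Decidable (Spec_boundary_pixel_count_py mask out) := by
  unfold Spec_boundary_pixel_count_py; infer_instance

-- ===== CLAIM (what is proved, stated in full; the proofs are below) =====
def Claim_equal_boundary_pixel_count_py : Prop := ∀ (mask : List (List Bool)), Dom_boundary_pixel_count_py mask → Pre_boundary_pixel_count_py mask → Spec_boundary_pixel_count_py mask (boundary_pixel_count_py mask)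

-- ===== LEMMAS AND PROOFS =====

-- the grid value at Int coordinates, exactly as A's port reads it
def bpcG (mask : List (List Bool)) (r c : Int) : Bool :=
  PySem.List.pyGetD (PySem.List.pyGetD mask r []) c false

-- 'neighbour (r, c) is in bounds and true'
def bpcNb (mask : List (List Bool)) (w r c : Int) : Bool :=
  decide (0 ≤ r ∧ r < (mask.length : Int) ∧ 0 ≤ c ∧ c < w) && bpcG mask r c

-- the per-cell indicator of B's interior (erosion) mask
def bpcInt (mask : List (List Bool)) (w r c : Int) : Bool :=
  bpcG mask r c && bpcNb mask w (r - 1) c && bpcNb mask w (r + 1) c &&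
    bpcNb mask w r (c - 1) && bpcNb mask w r (c + 1)

-- the common normal form both programs are reduced to
def bpcCell (mask : List (List Bool)) (w r c : Int) : Int :=
  (if bpcG mask r c then 1 else 0) - (if bpcInt mask w r c then 1 else 0)

theorem sum_map_sub_int {α : Type} (l : List α) (f g : α → Int) :
    (l.map (fun x => f x - g x)).sum = (l.map f).sum - (l.map g).sum := by
  induction l with
  | nil => simp
  | cons x xs ih => simp [ih]; ring

-- an if/else-if cascade with equal branches is an if over the disjunction
theorem ite4_or (p q r s : Prop) [Decidable p] [Decidable q] [Decidable r] [Decidable s] :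
    (if p then (1 : Int) else if q then 1 else if r then 1 else if s then 1 else 0) =
      if p ∨ q ∨ r ∨ s then 1 else 0 := by
  split_ifs <;> tauto

-- A's break condition for a neighbour is exactly 'bpcNb = false'
theorem bpcCond_iff (mask : List (List Bool)) (w r c : Int) :
    (c < 0 ∨ r < 0 ∨ w ≤ c ∨ (mask.length : Int) ≤ r ∨
      PySem.List.pyGetD (PySem.List.pyGetD mask r []) c false = false)
    ↔ bpcNb mask w r c = false := by
  unfold bpcNb bpcG
  rcases hg : PySem.List.pyGetD (PySem.List.pyGetD mask r []) c false
  · simp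
  · simp; omega

-- A's per-cell contribution equals bpcCell
theorem bpc_cellA (mask : List (List Bool)) (w ri ci : Int) :
    (if PySem.List.pyGetD (PySem.List.pyGetD mask ri []) ci false = false then (0 : Int)
     else bpcBreak mask w (mask.length : Int) ci ri [(1, 0), (-1, 0), (0, 1), (0, -1)]) =
    bpcCell mask w ri ci := by
  by_cases hg : PySem.List.pyGetD (PySem.List.pyGetD mask ri []) ci false = false
  · simp [hg, bpcCell, bpcInt, bpcG]
  · rw [if_neg hg]
    rw [Bool.not_eq_false] at hg
    have hgb : bpcG mask ri ci = true := hg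
    have f1 := bpcCond_iff mask w ri (ci + 1)
    have f2 := bpcCond_iff mask w ri (ci + -1)
    have f3 := bpcCond_iff mask w (ri + 1) ci
    have f4 := bpcCond_iff mask w (ri + -1) ci
    unfold bpcCell bpcInt
    rw [hgb]
    simp only [Bool.true_and, bpcBreak, add_zero, sub_eq_add_neg]
    rw [ite4_or]
    simp only [if_true]
    have hsub : ∀ X : Bool, (1 : Int) + -(if X then 1 else 0) = if X = false then 1 else 0 := by
      intro X; cases X <;> simp
    rw [hsub]
    refine if_congr ?_ rfl rfl
    rw [f1, f2, f3, f4]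
    generalize bpcNb mask w ri (ci + 1) = b1
    generalize bpcNb mask w ri (ci + -1) = b2
    generalize bpcNb mask w (ri + 1) ci = b3
    generalize bpcNb mask w (ri + -1) ci = b4
    rcases b1 <;> rcases b2 <;> rcases b3 <;> rcases b4 <;> simp

-- A reduced to the double sum of bpcCell over Nat ranges
theorem bpcA_eq_sum (mask : List (List Bool)) :
    boundary_pixel_count_py mask =
      ((List.range mask.length).map (fun (k : Nat) =>
        ((List.range (PySem.List.pyGetD mask 0 []).length).map (fun (j : Nat) =>
          bpcCell mask ((PySem.List.pyGetD mask 0 []).length : Int) (k : Int) (j : Int))).sum)).sum := by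
  simp only [boundary_pixel_count_py]
  have inner : ∀ (b ri : Int),
      (PySem.List.pyRange 0 ((PySem.List.pyGetD mask 0 []).length : Int) 1).foldl (fun boundary ci =>
        if PySem.List.pyGetD (PySem.List.pyGetD mask ri []) ci false = false then boundary
        else boundary + bpcBreak mask ((PySem.List.pyGetD mask 0 []).length : Int) (mask.length : Int)
          ci ri [(1, 0), (-1, 0), (0, 1), (0, -1)]) b
      = b + ((PySem.List.pyRange 0 ((PySem.List.pyGetD mask 0 []).length : Int) 1).map (fun ci =>
          bpcCell mask ((PySem.List.pyGetD mask 0 []).length : Int) ri ci)).sum := by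
    intro b ri
    rw [PySem.List.foldl_congr_mem _ _ (fun boundary ci =>
      boundary + bpcCell mask ((PySem.List.pyGetD mask 0 []).length : Int) ri ci) _
      (by
        intro acc x _
        have hcell := bpc_cellA mask ((PySem.List.pyGetD mask 0 []).length : Int) ri x
        by_cases h : PySem.List.pyGetD (PySem.List.pyGetD mask ri []) x false = false
        · rw [if_pos h] at hcell ⊢
          simp [← hcell]
        · rw [if_neg h] at hcell ⊢
          rw [hcell])]
    exact PySem.List.foldl_add _ _ _
  rw [PySem.List.foldl_congr_mem _ _ (fun boundary ri =>
    boundary + ((PySem.List.pyRange 0 ((PySem.List.pyGetD mask 0 []).length : Int) 1).map (fun ci =>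
      bpcCell mask ((PySem.List.pyGetD mask 0 []).length : Int) ri ci)).sum) _
    (by intro acc x _; exact inner acc x)]
  rw [PySem.List.foldl_add, zero_add]
  simp only [PySem.List.pyRange_zero_natCast, List.map_map, Function.comp_def]

-- generic: the zip-sum equals an index sum over the first list's length
theorem bpcInteriorRow_eq_sum (a : List Bool) :
    ∀ (u d l r : List Bool), a.length ≤ u.length → a.length ≤ d.length →
      a.length ≤ l.length → a.length ≤ r.length →
    bpcInteriorRow a u d l r =
      ((List.range a.length).map (fun j =>
        if a.getD j false && u.getD j false && d.getD j false && l.getD j false && r.getD j false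
        then (1 : Int) else 0)).sum := by
  induction a with
  | nil => intro u d l r _ _ _ _; simp [bpcInteriorRow]
  | cons x xs ih =>
    intro u d l r hu hd hl hr
    match u, d, l, r with
    | u0 :: us, d0 :: ds, l0 :: ls, r0 :: rs =>
      simp only [bpcInteriorRow, List.length_cons, List.range_succ_eq_map, List.map_cons,
        List.map_map, List.sum_cons, List.getD_cons_zero, Function.comp_def, Nat.succ_eq_add_one,
        List.getD_cons_succ]
      rw [ih us ds ls rs (by simpa using hu) (by simpa using hd) (by simpa using hl)
        (by simpa using hr)]
    | [], _, _, _ => simp at hu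
    | _ :: _, [], _, _ => simp at hd
    | _ :: _, _ :: _, [], _ => simp at hl
    | _ :: _, _ :: _, _ :: _, [] => simp at hr

theorem getD_take_bool (l : List Bool) (w k : Nat) (h : k < w) :
    (l.take w).getD k false = l.getD k false := by
  by_cases hk : k < l.length
  · rw [List.getD_eq_getElem _ _ (by simp; omega), List.getD_eq_getElem _ _ hk]
    simp [List.getElem_take]
  · rw [List.getD_eq_default _ _ (by simp; omega), List.getD_eq_default _ _ (by omega)]

theorem map_eq_map_range_getD {α β : Type} (l : List α) (f : α → β) (d : α) :
    l.map f = (List.range l.length).map (fun j => f (l.getD j d)) := by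
  induction l with
  | nil => simp
  | cons x xs ih =>
    simp only [List.map_cons, List.length_cons, List.range_succ_eq_map, List.map_map,
      Function.comp_def, Nat.succ_eq_add_one, List.getD_cons_succ, List.getD_cons_zero]
    rw [ih]

-- the grid value through bpcG, at Nat coordinates
theorem bpcG_natCast (mask : List (List Bool)) (k j : Nat) :
    bpcG mask (k : Int) (j : Int) = (mask.getD k []).getD j false := by
  simp [bpcG, PySem.List.pyGetD_natCast]

theorem bpcNb_in (mask : List (List Bool)) (w k j : Nat)
    (hk : k < mask.length) (hj : j < w) :
    bpcNb mask (w : Int) (k : Int) (j : Int) = (mask.getD k []).getD j false := by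
  unfold bpcNb
  rw [bpcG_natCast]
  rw [decide_eq_true (by omega :
    (0 : Int) ≤ (k : Int) ∧ (k : Int) < (mask.length : Int) ∧ (0 : Int) ≤ (j : Int) ∧ (j : Int) < (w : Int))]
  exact Bool.true_and _

theorem bpcNb_out (mask : List (List Bool)) (w : Int) (r c : Int)
    (h : ¬(0 ≤ r ∧ r < (mask.length : Int) ∧ 0 ≤ c ∧ c < w)) :
    bpcNb mask w r c = false := by
  unfold bpcNb
  rw [decide_eq_false h, Bool.false_and]

-- the row B reads at (possibly out-of-range) Int row index i: a truncated mask row or the pad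
def bpcRowAt (mask : List (List Bool)) (w : Nat) (i : Int) : List Bool :=
  if 0 ≤ i ∧ i < (mask.length : Int) then (mask.getD i.toNat []).take w
  else List.replicate w false

theorem length_take_row (mask : List (List Bool)) (w : Nat)
    (hrows : ∀ row ∈ mask, w ≤ row.length) (k : Nat) (hk : k < mask.length) :
    ((mask.getD k []).take w).length = w := by
  have hmem : mask.getD k [] ∈ mask := by
    rw [List.getD_eq_getElem _ _ hk]
    exact List.getElem_mem hk
  simp [List.length_take]
  exact hrows _ hmem

theorem length_bpcRowAt (mask : List (List Bool)) (w : Nat)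
    (hrows : ∀ row ∈ mask, w ≤ row.length) (i : Int) :
    (bpcRowAt mask w i).length = w := by
  unfold bpcRowAt
  split
  · rename_i h
    exact length_take_row mask w hrows i.toNat (by omega)
  · simp

theorem getD_bpcRowAt (mask : List (List Bool)) (w : Nat) (i : Int) (j : Nat) (hj : j < w) :
    (bpcRowAt mask w i).getD j false = bpcNb mask (w : Int) i (j : Int) := by
  unfold bpcRowAt
  split
  · rename_i h
    rw [getD_take_bool _ _ _ hj]
    conv_rhs => rw [show i = ((i.toNat : Nat) : Int) from (Int.toNat_of_nonneg h.1).symm]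
    rw [bpcNb_in mask w i.toNat j (by omega) hj]
  · rename_i h
    rw [bpcNb_out mask _ i (j : Int) (by omega)]
    by_cases hjw : j < w
    · rw [List.getD_eq_getElem _ _ (by simpa using hjw)]
      simp
    · rw [List.getD_eq_default _ _ (by simpa using hjw)]

theorem pyGetD_grid (mask : List (List Bool)) (w : Nat) (m : Nat) (hm : m < mask.length) :
    PySem.List.pyGetD (mask.map (fun row => row.take w)) ((m : Nat) : Int) [] =
      (mask.getD m []).take w := by
  rw [PySem.List.pyGetD_natCast]
  rw [List.getD_eq_getElem _ _ (by simpa using hm), List.getElem_map,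
    List.getD_eq_getElem _ _ hm]

-- the left/right shifted columns, index by index
theorem getD_left (cur : List Bool) (mask : List (List Bool)) (w k : Nat)
    (hk : k < mask.length) (hcur : cur = (mask.getD k []).take w)
    (hlen : cur.length = w) (j : Nat) (hj : j < w) :
    (false :: cur.dropLast).getD j false = bpcNb mask (w : Int) (k : Int) ((j : Int) - 1) := by
  cases j with
  | zero =>
    rw [List.getD_cons_zero,
      show bpcNb mask (w : Int) (k : Int) (((0 : Nat) : Int) - 1) = false from
        bpcNb_out _ _ _ _ (by omega)]
  | succ jj =>
    rw [List.getD_cons_succ]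
    have h1 : cur.dropLast.getD jj false = cur.getD jj false := by
      rw [List.getD_eq_getElem _ _ (by simp; omega),
        List.getD_eq_getElem _ _ (by omega)]
      simp [List.getElem_dropLast]
    rw [h1, hcur, getD_take_bool _ _ _ (by omega),
      show ((jj + 1 : Nat) : Int) - 1 = ((jj : Nat) : Int) by push_cast; ring,
      bpcNb_in mask w k jj hk (by omega)]

theorem getD_right (cur : List Bool) (mask : List (List Bool)) (w k : Nat)
    (hk : k < mask.length) (hcur : cur = (mask.getD k []).take w)
    (hlen : cur.length = w) (j : Nat) (hj : j < w) :
    (cur.drop 1 ++ [false]).getD j false = bpcNb mask (w : Int) (k : Int) ((j : Int) + 1) := by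
  by_cases hjw : j + 1 < w
  · have h1 : (cur.drop 1 ++ [false]).getD j false = cur.getD (j + 1) false := by
      rw [List.getD_eq_getElem _ _ (by simp; omega),
        List.getD_eq_getElem _ _ (by omega)]
      rw [List.getElem_append_left (by simp; omega)]
      simp
    rw [h1, hcur, getD_take_bool _ _ _ hjw,
      show ((j : Nat) : Int) + 1 = ((j + 1 : Nat) : Int) by push_cast; ring,
      bpcNb_in mask w k (j + 1) hk hjw]
  · have hj1 : j + 1 = w := by omega
    have h1 : (cur.drop 1 ++ [false]).getD j false = false := by
      rw [List.getD_eq_getElem _ _ (by simp; omega)]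
      rw [List.getElem_append_right (by simp; omega)]
      simp
    rw [h1,
      show bpcNb mask (w : Int) (k : Int) ((j : Int) + 1) = false from
        bpcNb_out _ _ _ _ (by omega)]

-- B's per-row zip-sum equals the interior-indicator sum
theorem bpcRow_eq (mask : List (List Bool)) (w : Nat)
    (hrows : ∀ row ∈ mask, w ≤ row.length) (k : Nat) (hk : k < mask.length) :
    bpcInteriorRow ((mask.getD k []).take w) (bpcRowAt mask w ((k : Int) - 1))
        (bpcRowAt mask w ((k : Int) + 1))
        (false :: ((mask.getD k []).take w).dropLast)
        (((mask.getD k []).take w).drop 1 ++ [false]) =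
      ((List.range w).map (fun (j : Nat) =>
        if bpcInt mask (w : Int) (k : Int) (j : Int) then (1 : Int) else 0)).sum := by
  have hcur : ((mask.getD k []).take w).length = w := length_take_row mask w hrows k hk
  rw [bpcInteriorRow_eq_sum _ _ _ _ _
      (by rw [length_bpcRowAt mask w hrows, hcur])
      (by rw [length_bpcRowAt mask w hrows, hcur])
      (by simp; omega)
      (by simp; omega),
    hcur]
  apply congrArg
  apply List.map_congr_left
  intro j hj
  rw [List.mem_range] at hj
  rw [getD_take_bool _ _ _ hj, getD_bpcRowAt mask w _ j hj, getD_bpcRowAt mask w _ j hj,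
    getD_left _ mask w k hk rfl hcur j hj, getD_right _ mask w k hk rfl hcur j hj]
  unfold bpcInt
  rw [bpcG_natCast]

-- B reduced to the same double sum, under Pre_
theorem bpcB_eq_sum (mask : List (List Bool))
    (hrows : ∀ row ∈ mask, (PySem.List.pyGetD mask 0 []).length ≤ row.length) :
    boundary_pixel_count_py_alt mask =
      ((List.range mask.length).map (fun (k : Nat) =>
        ((List.range (PySem.List.pyGetD mask 0 []).length).map (fun (j : Nat) =>
          bpcCell mask ((PySem.List.pyGetD mask 0 []).length : Int) (k : Int) (j : Int))).sum)).sum := by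
  simp only [boundary_pixel_count_py_alt, Int.toNat_natCast, List.length_map]
  set w : Nat := (PySem.List.pyGetD mask 0 []).length with hw
  have htot : ((mask.map (fun row => row.take w)).map
        (fun row => (row.map (fun b => if b then (1 : Int) else 0)).sum)).sum =
      ((List.range mask.length).map (fun (k : Nat) =>
        ((List.range w).map (fun (j : Nat) =>
          if bpcG mask (k : Int) (j : Int) then (1 : Int) else 0)).sum)).sum := by
    rw [List.map_map, map_eq_map_range_getD mask _ []]
    congr 1
    apply List.map_congr_left
    intro k hk
    rw [List.mem_range] at hk
    simp only [Function.comp_apply]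
    rw [map_eq_map_range_getD _ _ false, length_take_row mask w hrows k hk]
    congr 1
    apply List.map_congr_left
    intro j hj
    rw [List.mem_range] at hj
    rw [getD_take_bool _ _ _ hj, bpcG_natCast]
  have hint : ((PySem.List.enumerate (mask.map (fun row => row.take w))).map (fun ic =>
        bpcInteriorRow ic.2
          (if 0 < ic.1 then PySem.List.pyGetD (mask.map (fun row => row.take w)) (ic.1 - 1) []
            else List.replicate w false)
          (if ic.1 + 1 < (mask.length : Int)
            then PySem.List.pyGetD (mask.map (fun row => row.take w)) (ic.1 + 1) []
            else List.replicate w false)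
          (false :: ic.2.dropLast) (ic.2.drop 1 ++ [false]))).sum =
      ((List.range mask.length).map (fun (k : Nat) =>
        ((List.range w).map (fun (j : Nat) =>
          if bpcInt mask (w : Int) (k : Int) (j : Int) then (1 : Int) else 0)).sum)).sum := by
    rw [PySem.List.enumerate_eq_map_pyRange _ ([] : List Bool), List.map_map]
    simp only [PySem.List.len_eq, List.length_map]
    rw [PySem.List.pyRange_zero_natCast, List.map_map]
    congr 1
    apply List.map_congr_left
    intro k hk
    rw [List.mem_range] at hk
    simp only [Function.comp_apply]
    have hcur : PySem.List.pyGetD (mask.map (fun row => row.take w)) ((k : Nat) : Int) [] =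
        (mask.getD k []).take w := pyGetD_grid mask w k hk
    have habove : (if 0 < ((k : Nat) : Int)
          then PySem.List.pyGetD (mask.map (fun row => row.take w)) (((k : Nat) : Int) - 1) []
          else List.replicate w false) = bpcRowAt mask w (((k : Nat) : Int) - 1) := by
      cases k with
      | zero =>
        rw [if_neg (by omega)]
        unfold bpcRowAt
        rw [if_neg (by omega)]
      | succ m =>
        rw [if_pos (by omega)]
        rw [show (((m + 1 : Nat) : Int)) - 1 = ((m : Nat) : Int) by push_cast; ring]
        rw [pyGetD_grid mask w m (by omega)]
        unfold bpcRowAt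
        rw [if_pos (by omega)]
        simp
    have hbelow : (if ((k : Nat) : Int) + 1 < (mask.length : Int)
          then PySem.List.pyGetD (mask.map (fun row => row.take w)) (((k : Nat) : Int) + 1) []
          else List.replicate w false) = bpcRowAt mask w (((k : Nat) : Int) + 1) := by
      by_cases h : k + 1 < mask.length
      · rw [if_pos (by omega)]
        rw [show (((k : Nat) : Int)) + 1 = ((k + 1 : Nat) : Int) by push_cast; ring]
        rw [pyGetD_grid mask w (k + 1) h]
        unfold bpcRowAt
        rw [if_pos (by omega)]
        simp
      · rw [if_neg (by omega)]
        unfold bpcRowAt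
        rw [if_neg (by omega)]
    rw [hcur, habove, hbelow]
    exact bpcRow_eq mask w hrows k hk
  rw [htot, hint, ← sum_map_sub_int]
  congr 1
  apply List.map_congr_left
  intro k _
  rw [← sum_map_sub_int]
  rfl

-- ===== VERDICT (by name: the statement is the Claim_ definition above) =====
theorem boundary_pixel_count_py_spec : Claim_equal_boundary_pixel_count_py := by
  intro mask _ hpre
  unfold Spec_boundary_pixel_count_py
  have hhead : mask.headI = PySem.List.pyGetD mask 0 [] := by
    cases mask with
    | nil => exact absurd rfl hpre.1
    | cons a l => simp [PySem.List.pyGetD_zero]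
  rw [bpcA_eq_sum, bpcB_eq_sum mask (by rw [← hhead]; exact hpre.2)]
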